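-- pv_equiv track=rewrite | github.com/lissrbay/bug_ml | new/data_aggregation/collect_sources.py | find_file_lines
-- ===== SOURCE A (Python) =====
-- def find_file_lines(code: str, char_bounds):
--     char_lines = []
--     for i, line in enumerate(code.split('\n')):
--         for _ in line:
--             char_lines.append(i)
--         else:
--             char_lines.append(i)
--     else:
--         char_lines.append(i)
--
--     assert len(code) == len(code)
--     return (char_lines[char_bounds[0]], char_lines[char_bounds[1]])
-- ===== SOURCE B (Python) =====
-- def find_file_lines(code: str, char_bounds):
--     return (code[:char_bounds[0]].count('\n'), code[:char_bounds[1]].count('\n'))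
-- ===== Notes on version B (the rewrite author's own statement) =====
-- stated objective: simpler
-- what changed: Drops the per-character line table built from split('\n') with nested append loops; each result is computed directly as the number of newlines in the prefix code[:bound] (no intermediate list of length len(code)+2 is materialised).
-- intended difference: For a negative in-range bound whose two-slot wraparound window crosses a newline, A returns the newline count of code[:len(code)+2+b] read from its accidentally 2-slot-padded table, while B returns the newline count of code[:b]; a negative offset is unspecified for this function and B's plain from-the-end slice reading is the natural choice, not A's padding artefact. — e.g. on find_file_lines("\n", [-1, 0]): A returns (1, 0), B returns (0, 0)
import Mathlib
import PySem

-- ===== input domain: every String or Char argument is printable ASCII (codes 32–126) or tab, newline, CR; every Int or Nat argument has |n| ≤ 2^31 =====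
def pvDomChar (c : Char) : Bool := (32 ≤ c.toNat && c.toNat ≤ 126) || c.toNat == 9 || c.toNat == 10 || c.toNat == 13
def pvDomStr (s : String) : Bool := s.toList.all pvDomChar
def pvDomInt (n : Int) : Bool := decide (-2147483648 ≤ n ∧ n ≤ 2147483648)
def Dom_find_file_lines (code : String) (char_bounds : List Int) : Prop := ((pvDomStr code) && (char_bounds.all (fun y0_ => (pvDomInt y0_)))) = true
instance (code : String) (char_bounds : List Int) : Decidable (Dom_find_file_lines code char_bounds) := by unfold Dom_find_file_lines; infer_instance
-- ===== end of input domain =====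

-- B replaces A's per-character line table with two direct newline counts over prefixes (simpler).

-- ===== PORT A =====
-- the enumerate-fold carries (char_lines, i); the trailing for-else/else appends are the '++ [p.1]' and the final '++ [st.2]'
def find_file_lines (code : String) (char_bounds : List Int) : Int × Int :=
  let lines := PySem.Chars.splitOn code.toList ['\n']
  let st := (PySem.List.enumerate lines 0).foldl
    (fun (st : List Int × Int) (p : Int × List Char) =>
      (st.1 ++ p.2.map (fun _ => p.1) ++ [p.1], p.1)) ([], 0)
  let char_lines := st.1 ++ [st.2]
  (PySem.List.pyGetD char_lines (PySem.List.pyGetD char_bounds 0 0) 0,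
   PySem.List.pyGetD char_lines (PySem.List.pyGetD char_bounds 1 0) 0)

-- ===== PORT B =====
def find_file_lines_alt (code : String) (char_bounds : List Int) : Int × Int :=
  ((PySem.Chars.count (PySem.Chars.slice code.toList none (some (PySem.List.pyGetD char_bounds 0 0))) ['\n'] : Int),
   (PySem.Chars.count (PySem.Chars.slice code.toList none (some (PySem.List.pyGetD char_bounds 1 0))) ['\n'] : Int))

-- ===== PRECONDITION & SPEC =====
-- Pre_ excludes exactly the inputs where A raises IndexError: bounds lists shorter than 2,
-- and a first-or-second bound outside [-(len(code)+2), len(code)+1] (A indexes a table of length len(code)+2).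
def Pre_find_file_lines (code : String) (char_bounds : List Int) : Prop :=
  2 ≤ char_bounds.length ∧
  ∀ b ∈ char_bounds.take 2,
    -((code.toList.length : Int) + 2) ≤ b ∧ b ≤ (code.toList.length : Int) + 1

instance (code : String) (char_bounds : List Int) : Decidable (Pre_find_file_lines code char_bounds) := by
  unfold Pre_find_file_lines; infer_instance

def pvWitness_find_file_lines : String × List Int := ("a\nb", [0, 3])

-- For a negative in-range bound whose two-slot wraparound window crosses a newline, A returns the
-- newline count of code[:len(code)+2+b] read from its accidentally 2-slot-padded table, while B
-- returns the newline count of code[:b] — the natural from-the-end reading of an unspecified negative offset.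
def D_find_file_lines (code : String) (char_bounds : List Int) : Prop :=
  ∃ b ∈ char_bounds.take 2, b < 0 ∧
    '\n' ∈ ((code.toList.take ((code.toList.length : Int) + 2 + b).toNat).drop
              ((code.toList.length : Int) + b).toNat)

instance (code : String) (char_bounds : List Int) : Decidable (D_find_file_lines code char_bounds) := by
  unfold D_find_file_lines; infer_instance

def Spec_find_file_lines (code : String) (char_bounds : List Int) (out : Int × Int) : Prop :=
  ¬ D_find_file_lines code char_bounds → out = find_file_lines_alt code char_bounds
instance (code : String) (char_bounds : List Int) (out : Int × Int) : Decidable (Spec_find_file_lines code char_bounds out) := by unfold Spec_find_file_lines; infer_instance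

def pvDiffWitness_find_file_lines : String × List Int := ("\n", [-1, 0])
def pvDiffWitnessOut_find_file_lines : (Int × Int) × (Int × Int) := ((1, 0), (0, 0))

-- ===== CLAIM (what is proved, stated in full; the proofs are below) =====
def Claim_unchanged_find_file_lines : Prop := ∀ (code : String) (char_bounds : List Int), Dom_find_file_lines code char_bounds → Pre_find_file_lines code char_bounds → Spec_find_file_lines code char_bounds (find_file_lines code char_bounds)
def Claim_changed_find_file_lines : Prop := Dom_find_file_lines (pvDiffWitness_find_file_lines.1) (pvDiffWitness_find_file_lines.2) ∧ Pre_find_file_lines (pvDiffWitness_find_file_lines.1) (pvDiffWitness_find_file_lines.2) ∧ D_find_file_lines (pvDiffWitness_find_file_lines.1) (pvDiffWitness_find_file_lines.2) ∧ find_file_lines (pvDiffWitness_find_file_lines.1) (pvDiffWitness_find_file_lines.2) = pvDiffWitnessOut_find_file_lines.1 ∧ find_file_lines_alt (pvDiffWitness_find_file_lines.1) (pvDiffWitness_find_file_lines.2) = pvDiffWitnessOut_find_file_lines.2 ∧ pvDiffWitnessOut_find_file_lines.1 ≠ pvDiffWitnessOut_find_file_lines.2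
def Claim_exact_find_file_lines : Prop := ∀ (code : String) (char_bounds : List Int), Dom_find_file_lines code char_bounds → Pre_find_file_lines code char_bounds → D_find_file_lines code char_bounds → find_file_lines code char_bounds ≠ find_file_lines_alt code char_bounds

-- ===== LEMMAS AND PROOFS =====

-- recursive form of str.split('\n')
def splitNl : List Char → List (List Char)
  | [] => [[]]
  | c :: r =>
    if c = '\n' then [] :: splitNl r
    else
      match splitNl r with
      | [] => [[c]]
      | p :: ps => (c :: p) :: ps

theorem splitNl_ne_nil (cs : List Char) : splitNl cs ≠ [] := by
  cases cs with
  | nil => simp [splitNl]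
  | cons c r =>
    simp only [splitNl]
    split_ifs with h
    · simp
    · cases h' : splitNl r <;> simp

theorem splitOn_go_spec : ∀ (fuel : Nat) (l cur : List Char) (acc : List (List Char)),
    l.length ≤ fuel →
    PySem.Chars.splitOn.go ['\n'] fuel l cur acc
      = acc.reverse ++ (cur.reverse ++ (splitNl l).headI) :: (splitNl l).tail := by
  intro fuel
  induction fuel with
  | zero =>
    intro l cur acc hl
    have : l = [] := by simpa using List.eq_nil_of_length_eq_zero (by omega)
    subst this
    simp [PySem.Chars.splitOn.go, splitNl]
  | succ fuel ih =>
    intro l cur acc hl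
    cases l with
    | nil => simp [PySem.Chars.splitOn.go, splitNl]
    | cons c rest =>
      by_cases hc : c = '\n'
      · subst hc
        rw [show PySem.Chars.splitOn.go ['\n'] (fuel+1) ('\n' :: rest) cur acc
            = PySem.Chars.splitOn.go ['\n'] fuel (List.drop 1 ('\n' :: rest)) [] (cur.reverse :: acc) from by
          simp [PySem.Chars.splitOn.go, List.isPrefixOf]]
        rw [ih _ _ _ (by simp at hl ⊢; omega)]
        cases h' : splitNl rest with
        | nil => exact absurd h' (splitNl_ne_nil rest)
        | cons p ps => simp [splitNl, h']
      · rw [show PySem.Chars.splitOn.go ['\n'] (fuel+1) (c :: rest) cur acc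
            = PySem.Chars.splitOn.go ['\n'] fuel rest (c :: cur) acc from by
          simp [PySem.Chars.splitOn.go, List.isPrefixOf]; intro h; exact absurd h.symm hc]
        rw [ih _ _ _ (by simp at hl ⊢; omega)]
        cases h' : splitNl rest with
        | nil => exact absurd h' (splitNl_ne_nil rest)
        | cons p ps => simp [splitNl, h', hc]

theorem splitOn_eq (cs : List Char) :
    PySem.Chars.splitOn cs ['\n'] = splitNl cs := by
  unfold PySem.Chars.splitOn
  rw [splitOn_go_spec _ _ _ _ (by omega)]
  cases h : splitNl cs with
  | nil => exact absurd h (splitNl_ne_nil cs)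
  | cons p ps => simp

theorem count_go_spec : ∀ (fuel : Nat) (l : List Char) (acc : Nat),
    l.length ≤ fuel →
    PySem.Chars.count.go ['\n'] fuel l acc = acc + l.count '\n' := by
  intro fuel
  induction fuel with
  | zero =>
    intro l acc hl
    have : l = [] := by simpa using List.eq_nil_of_length_eq_zero (by omega)
    subst this
    simp [PySem.Chars.count.go]
  | succ fuel ih =>
    intro l acc hl
    cases l with
    | nil => simp [PySem.Chars.count.go]
    | cons c rest =>
      by_cases hc : c = '\n'
      · subst hc
        rw [show PySem.Chars.count.go ['\n'] (fuel+1) ('\n' :: rest) acc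
            = PySem.Chars.count.go ['\n'] fuel (List.drop 1 ('\n' :: rest)) (acc + 1) from by
          simp [PySem.Chars.count.go, List.isPrefixOf]]
        rw [ih _ _ (by simp at hl ⊢; omega)]
        simp
        omega
      · rw [show PySem.Chars.count.go ['\n'] (fuel+1) (c :: rest) acc
            = PySem.Chars.count.go ['\n'] fuel rest acc from by
          simp [PySem.Chars.count.go, List.isPrefixOf]; intro h; exact absurd h.symm hc]
        rw [ih _ _ (by simp at hl ⊢; omega)]
        simp [hc]

theorem count_nl (cs : List Char) : PySem.Chars.count cs ['\n'] = cs.count '\n' := by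
  unfold PySem.Chars.count
  rw [if_neg (by simp)]
  rw [count_go_spec _ _ _ (by omega)]
  omega

-- the flat table: one entry per character plus one per line, indices counted from i
def tblFrom : Int → List (List Char) → List Int
  | _, [] => []
  | i, l :: ls => (l.map (fun _ => i) ++ [i]) ++ tblFrom (i + 1) ls

theorem tblFrom_shift : ∀ (ls : List (List Char)) (i : Int),
    tblFrom (i + 1) ls = (tblFrom i ls).map (· + 1) := by
  intro ls
  induction ls with
  | nil => intro i; simp [tblFrom]
  | cons l ls ih =>
    intro i
    simp [tblFrom, ih (i + 1)]

theorem fold_eq : ∀ (ls : List (List Char)) (i0 : Int) (acc : List Int) (j : Int),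
    (PySem.List.enumerate ls i0).foldl
      (fun (st : List Int × Int) (p : Int × List Char) =>
        (st.1 ++ p.2.map (fun _ => p.1) ++ [p.1], p.1)) (acc, j)
    = (acc ++ tblFrom i0 ls, if ls.isEmpty then j else i0 + ls.length - 1) := by
  intro ls
  induction ls with
  | nil => intro i0 acc j; simp [PySem.List.enumerate, tblFrom]
  | cons l ls ih =>
    intro i0 acc j
    rw [show PySem.List.enumerate (l :: ls) i0 = (i0, l) :: PySem.List.enumerate ls (i0 + 1) from by
      simp [PySem.List.enumerate]]
    rw [List.foldl_cons, ih]
    cases ls with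
    | nil => simp [tblFrom]
    | cons l' ls' => simp [tblFrom]; omega

def fullTbl (cs : List Char) : List Int :=
  tblFrom 0 (splitNl cs) ++ [((splitNl cs).length : Int) - 1]

theorem fullTbl_eq (cs : List Char) :
    fullTbl cs = (List.range (cs.length + 2)).map (fun j => ((cs.take j).count '\n' : Int)) := by
  induction cs with
  | nil => decide
  | cons c r ih =>
    have hrange : List.range ((c :: r).length + 2)
        = 0 :: (List.range (r.length + 2)).map Nat.succ := by
      simp [List.range_succ_eq_map]
    by_cases hc : c = '\n'
    · subst hc
      have hsplit : splitNl ('\n' :: r) = [] :: splitNl r := by simp [splitNl]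
      have hs : tblFrom 1 (splitNl r) = (tblFrom 0 (splitNl r)).map (· + 1) := by
        simpa using tblFrom_shift (splitNl r) 0
      have key := congrArg (List.map (· + (1 : Int))) ih
      rw [fullTbl] at key
      simp only [List.map_append, List.map_map, List.map_cons, List.map_nil] at key
      rw [fullTbl, hsplit, hrange]
      simp only [tblFrom, List.map_nil, List.nil_append, List.map_cons, List.map_map,
        List.length_cons, List.cons_append]
      rw [show ((0:Int)+1) = 1 from rfl, hs]
      congr 1
      have key' : List.map (fun x => x + 1) (tblFrom 0 (splitNl r)) ++ [((splitNl r).length : Int)]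
          = List.map ((fun x => x + 1) ∘ fun j => ((List.count '\n' (List.take j r) : Nat) : Int)) (List.range (r.length + 2)) := by
        rw [show (((splitNl r).length : Int) - 1 + 1) = ((splitNl r).length : Int) from by ring] at key
        exact key
      rw [show ((((splitNl r).length + 1 : Nat)) : Int) - 1 = (((splitNl r).length : Nat) : Int) from by push_cast; ring]
      refine key'.trans (List.map_congr_left ?_)
      intro j hj
      simp
    · have hne := splitNl_ne_nil r
      cases hP : splitNl r with
      | nil => exact absurd hP hne
      | cons p ps =>
        have hsplit : splitNl (c :: r) = (c :: p) :: ps := by simp [splitNl, hc, hP]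
        rw [fullTbl, hsplit, hrange]
        rw [fullTbl, hP] at ih
        simp only [tblFrom, List.map_cons, List.map_map, List.length_cons, List.cons_append]
        congr 1
        have h1 : (((p :: ps).length : Nat) : Int) - 1 = ((ps.length : Nat) : Int) := by
          simp
        rw [h1] at ih
        simp only [tblFrom, List.cons_append, List.append_assoc,
          List.nil_append, List.map_const'] at ih ⊢
        rw [show (((ps.length + 1 : Nat)) : Int) - 1 = ((ps.length : Nat) : Int) from by push_cast; ring]
        refine ih.trans (List.map_congr_left ?_)
        intro j hj
        simp [hc]

theorem portA_eq (code : String) (char_bounds : List Int) :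
    find_file_lines code char_bounds
      = (PySem.List.pyGetD (fullTbl code.toList) (PySem.List.pyGetD char_bounds 0 0) 0,
         PySem.List.pyGetD (fullTbl code.toList) (PySem.List.pyGetD char_bounds 1 0) 0) := by
  unfold find_file_lines fullTbl
  simp only [splitOn_eq, fold_eq]
  cases hP : splitNl code.toList with
  | nil => exact absurd hP (splitNl_ne_nil _)
  | cons p ps => simp

-- one component, outside the change window
theorem comp_eq (cs : List Char) (b : Int)
    (h1 : -((cs.length : Int) + 2) ≤ b) (h2 : b ≤ (cs.length : Int) + 1)
    (hD : ¬ (b < 0 ∧ '\n' ∈ ((cs.take ((cs.length : Int) + 2 + b).toNat).drop ((cs.length : Int) + b).toNat))) :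
    PySem.List.pyGetD (fullTbl cs) b 0
      = (PySem.Chars.count (PySem.Chars.slice cs none (some b)) ['\n'] : Int) := by
  rw [fullTbl_eq]
  rw [show PySem.Chars.slice cs none (some b) = PySem.List.slice cs none (some b) from
    PySem.Chars.slice_eq_listSlice cs none (some b)]
  by_cases hb : 0 ≤ b
  · rw [PySem.List.pyGetD_eq_getElem _ _ hb (by simp; omega)]
    rw [PySem.List.slice_to _ hb, count_nl]
    simp
  · push Not at hb
    have hk0 : 0 < (-b).toNat := by omega
    have hkb : b = -(((-b).toNat : Nat) : Int) := by omega
    rw [hkb, PySem.List.pyGetD_neg_natCast _ _ _ hk0 (by simp; omega),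
      PySem.List.slice_to_neg_natCast _ _ hk0, count_nl]
    rw [List.getElem_map, List.getElem_range]
    have hwin : List.count '\n' ((cs.take (((cs.length : Int) + 2 + b).toNat)).drop (((cs.length : Int) + b).toNat)) = 0 := by
      rw [List.count_eq_zero]
      intro hmem
      exact hD ⟨hb, hmem⟩
    have h2' : (((cs.length : Int) + 2 + b).toNat) = cs.length + 2 - (-b).toNat := by omega
    have h3' : (((cs.length : Int) + b).toNat) = cs.length - (-b).toNat := by omega
    rw [h2', h3'] at hwin
    have hsplit : cs.take (cs.length + 2 - (-b).toNat)
        = cs.take (cs.length - (-b).toNat) ++ ((cs.take (cs.length + 2 - (-b).toNat)).drop (cs.length - (-b).toNat)) := by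
      conv_lhs => rw [← List.take_append_drop (cs.length - (-b).toNat) (cs.take (cs.length + 2 - (-b).toNat))]
      congr 1
      rw [List.take_take]
      congr 1
      omega
    have hgoal : List.count '\n' (cs.take (cs.length + 2 - (-b).toNat))
        = List.count '\n' (cs.take (cs.length - (-b).toNat)) := by
      conv_lhs => rw [hsplit]
      rw [List.count_append, hwin]
      omega
    simp only [List.length_map, List.length_range]
    rw [hgoal]

theorem comp_gt (cs : List Char) (b : Int)
    (h1 : -((cs.length : Int) + 2) ≤ b) (hb : b < 0)
    (hm : '\n' ∈ ((cs.take ((cs.length : Int) + 2 + b).toNat).drop ((cs.length : Int) + b).toNat)) :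
    (PySem.Chars.count (PySem.Chars.slice cs none (some b)) ['\n'] : Int)
      < PySem.List.pyGetD (fullTbl cs) b 0 := by
  rw [fullTbl_eq]
  rw [show PySem.Chars.slice cs none (some b) = PySem.List.slice cs none (some b) from
    PySem.Chars.slice_eq_listSlice cs none (some b)]
  have hk0 : 0 < (-b).toNat := by omega
  have hkb : b = -(((-b).toNat : Nat) : Int) := by omega
  rw [hkb, PySem.List.pyGetD_neg_natCast _ _ _ hk0 (by simp; omega),
    PySem.List.slice_to_neg_natCast _ _ hk0, count_nl]
  rw [List.getElem_map, List.getElem_range]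
  have h2' : (((cs.length : Int) + 2 + b).toNat) = cs.length + 2 - (-b).toNat := by omega
  have h3' : (((cs.length : Int) + b).toNat) = cs.length - (-b).toNat := by omega
  rw [h2', h3'] at hm
  have hwin : 0 < List.count '\n' ((cs.take (cs.length + 2 - (-b).toNat)).drop (cs.length - (-b).toNat)) :=
    List.count_pos_iff.mpr hm
  have hsplit : cs.take (cs.length + 2 - (-b).toNat)
      = cs.take (cs.length - (-b).toNat) ++ ((cs.take (cs.length + 2 - (-b).toNat)).drop (cs.length - (-b).toNat)) := by
    conv_lhs => rw [← List.take_append_drop (cs.length - (-b).toNat) (cs.take (cs.length + 2 - (-b).toNat))]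
    congr 1
    rw [List.take_take]
    congr 1
    omega
  have hgoal : List.count '\n' (cs.take (cs.length - (-b).toNat))
      < List.count '\n' (cs.take (cs.length + 2 - (-b).toNat)) := by
    conv_rhs => rw [hsplit]
    rw [List.count_append]
    omega
  simp only [List.length_map, List.length_range]
  exact_mod_cast hgoal

theorem extract_bounds (b0 b1 : Int) (rest : List Int) :
    PySem.List.pyGetD (b0 :: b1 :: rest) 0 0 = b0 ∧ PySem.List.pyGetD (b0 :: b1 :: rest) 1 0 = b1 := by
  constructor
  · exact PySem.List.pyGetD_zero_cons b0 (b1 :: rest) 0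
  · rw [PySem.List.pyGetD_eq_getElem _ _ (by omega) (by simp)]
    rfl


-- ===== VERDICT (by name: the statement is the Claim_ definition above) =====
theorem find_file_lines_spec : Claim_unchanged_find_file_lines := by
  intro code cb _hdom hpre
  unfold Spec_find_file_lines
  intro hnd
  obtain ⟨hlen, hbnd⟩ := hpre
  cases cb with
  | nil => simp at hlen
  | cons b0 tl =>
    cases tl with
    | nil => simp at hlen
    | cons b1 rest =>
      obtain ⟨e0, e1⟩ := extract_bounds b0 b1 rest
      have h0 := hbnd b0 (by simp)
      have h1 := hbnd b1 (by simp)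
      unfold D_find_file_lines at hnd
      have hD0 : ¬ (b0 < 0 ∧ '\n' ∈ ((code.toList.take ((code.toList.length : Int) + 2 + b0).toNat).drop ((code.toList.length : Int) + b0).toNat)) := by
        intro h; exact hnd ⟨b0, by simp, h⟩
      have hD1 : ¬ (b1 < 0 ∧ '\n' ∈ ((code.toList.take ((code.toList.length : Int) + 2 + b1).toNat).drop ((code.toList.length : Int) + b1).toNat)) := by
        intro h; exact hnd ⟨b1, by simp, h⟩
      rw [portA_eq]
      unfold find_file_lines_alt
      rw [e0, e1]
      exact Prod.ext_iff.mpr ⟨comp_eq code.toList b0 h0.1 h0.2 hD0, comp_eq code.toList b1 h1.1 h1.2 hD1⟩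

theorem find_file_lines_changed : Claim_changed_find_file_lines := by
  unfold Claim_changed_find_file_lines; decide

theorem find_file_lines_tight : Claim_exact_find_file_lines := by
  intro code cb _hdom hpre hd
  obtain ⟨hlen, hbnd⟩ := hpre
  cases cb with
  | nil => simp at hlen
  | cons b0 tl =>
    cases tl with
    | nil => simp at hlen
    | cons b1 rest =>
      obtain ⟨e0, e1⟩ := extract_bounds b0 b1 rest
      have h0 := hbnd b0 (by simp)
      have h1 := hbnd b1 (by simp)
      unfold D_find_file_lines at hd
      obtain ⟨b, hbmem, hbneg, hmem⟩ := hd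
      rw [portA_eq]
      unfold find_file_lines_alt
      rw [e0, e1]
      intro heq
      simp only [List.take, List.mem_cons, List.not_mem_nil, or_false] at hbmem
      rcases hbmem with hb | hb
      · subst hb
        have := comp_gt code.toList b h0.1 hbneg hmem
        have h1st := congrArg Prod.fst heq
        simp only at h1st
        omega
      · subst hb
        have := comp_gt code.toList b h1.1 hbneg hmem
        have h2nd := congrArg Prod.snd heq
        simp only at h2nd
        omega
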